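-- pv_equiv track=rewrite | github.com/Feal-ca/Class-Code | ExercisesPy/creixentBase.py | es_creixent_decreixent
-- ===== SOURCE A (Python) =====
-- def es_creixent_decreixent(b: int, n: int,d: int):
--     """
--     Indica (True) si n en base b los digitos impares desde la izquierda son crecientes, y los pares decrecientes
--     """
--     if d%2==0:
--         if n<(b*b*b):
--             if (n%b)<=(n//(b*b))%b:
--                 return False
--
--             return True
--         else:
--             if (n%b)<=(n//(b*b))%b:
--                 return False
--             if (n//b)%b>=(n//(b*b*b))%b:
--                 return False
--             return es_creixent_decreixent(b, n//(b*b), d)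
--     else:
--         if n<(b*b):
--             return True
--         else:
--             if (n%b)>=(n//(b*b))%b:
--                 return False
--             if (n//b)%b<=(n//(b*b*b))%b:
--                 return False
--
--             return es_creixent_decreixent(b, n//(b*b), d)
-- ===== SOURCE B (Python) =====
-- def es_creixent_decreixent(b: int, n: int, d: int):
--     """
--     Indica (True) si n en base b los digitos impares desde la izquierda son crecientes, y los pares decrecientes
--     """
--     inc = d % 2 != 0
--     while True:
--         bb = b * b
--         if inc:
--             if n < bb:
--                 return True
--         else:
--             if n < bb * b:
--                 return n % b > (n // bb) % b
--         lo, hi = n % b, (n // bb) % b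
--         mid, top = (n // b) % b, (n // (bb * b)) % b
--         ok = (lo < hi and mid > top) if inc else (lo > hi and mid < top)
--         if not ok:
--             return False
--         n //= bb
-- ===== Notes on version B (the rewrite author's own statement) =====
-- stated objective: alternative
-- what changed: Replaced the tail recursion by a single while-True loop over the shrinking n, with the four digit values extracted once per iteration and the guard cascade fused into one combined comparison (shared between the two parity cases).
import Mathlib
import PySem

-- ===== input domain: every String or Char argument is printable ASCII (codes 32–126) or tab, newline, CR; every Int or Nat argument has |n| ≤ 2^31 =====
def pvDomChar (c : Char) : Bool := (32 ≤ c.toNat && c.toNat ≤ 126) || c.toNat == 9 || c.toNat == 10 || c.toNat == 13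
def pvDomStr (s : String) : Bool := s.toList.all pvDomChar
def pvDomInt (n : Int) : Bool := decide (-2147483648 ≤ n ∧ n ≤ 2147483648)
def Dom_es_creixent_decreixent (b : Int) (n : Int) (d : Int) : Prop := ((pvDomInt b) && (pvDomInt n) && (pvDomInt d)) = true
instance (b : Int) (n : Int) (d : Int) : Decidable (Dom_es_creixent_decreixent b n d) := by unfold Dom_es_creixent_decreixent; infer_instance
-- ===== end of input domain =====

-- B replaces A's tail recursion by a while-True loop with a single combined
-- comparison per step (objective: alternative decomposition, same cost).

-- ===== PORT A =====
-- literal transliteration of A's tail recursion; fuel only makes it total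
-- (never exhausted on inputs where the Python returns: each recursive call
-- strictly shrinks |n|)
def pvGoA (fuel : Nat) (b : Int) (n : Int) (d : Int) : Bool :=
  match fuel with
  | 0 => false
  | f + 1 =>
    if PySem.Int.mod d 2 = 0 then
      if n < b * b * b then
        if PySem.Int.mod n b ≤ PySem.Int.mod (PySem.Int.floordiv n (b * b)) b then false
        else true
      else
        if PySem.Int.mod n b ≤ PySem.Int.mod (PySem.Int.floordiv n (b * b)) b then false
        else if PySem.Int.mod (PySem.Int.floordiv n b) b ≥ PySem.Int.mod (PySem.Int.floordiv n (b * b * b)) b then false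
        else pvGoA f b (PySem.Int.floordiv n (b * b)) d
    else
      if n < b * b then true
      else
        if PySem.Int.mod n b ≥ PySem.Int.mod (PySem.Int.floordiv n (b * b)) b then false
        else if PySem.Int.mod (PySem.Int.floordiv n b) b ≤ PySem.Int.mod (PySem.Int.floordiv n (b * b * b)) b then false
        else pvGoA f b (PySem.Int.floordiv n (b * b)) d

def es_creixent_decreixent (b : Int) (n : Int) (d : Int) : Bool :=
  pvGoA (n.natAbs + 2) b n d

-- ===== PORT B =====
-- the body of Source B's `while True` loop; fuel bounds the iteration count only
def pvLoopB (fuel : Nat) (b : Int) (inc : Bool) (n : Int) : Bool :=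
  match fuel with
  | 0 => false
  | f + 1 =>
    let bb := b * b
    if inc ∧ n < bb then true
    else if ¬ inc ∧ n < bb * b then
      decide (PySem.Int.mod n b > PySem.Int.mod (PySem.Int.floordiv n bb) b)
    else
      let lo := PySem.Int.mod n b
      let hi := PySem.Int.mod (PySem.Int.floordiv n bb) b
      let mid := PySem.Int.mod (PySem.Int.floordiv n b) b
      let top := PySem.Int.mod (PySem.Int.floordiv n (bb * b)) b
      let ok := if inc then lo < hi ∧ mid > top else lo > hi ∧ mid < top
      if ¬ ok then false
      else pvLoopB f b inc (PySem.Int.floordiv n bb)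

def es_creixent_decreixent_alt (b : Int) (n : Int) (d : Int) : Bool :=
  pvLoopB (n.natAbs + 2) b (decide (PySem.Int.mod d 2 ≠ 0)) n

-- ===== PRECONDITION & SPEC =====
-- Pre_ excludes exactly the inputs on which the Python A raises
-- ZeroDivisionError: b = 0 unless the odd-d negative-n base case returns first.
def Pre_es_creixent_decreixent (b : Int) (n : Int) (d : Int) : Prop :=
  b ≠ 0 ∨ (PySem.Int.mod d 2 ≠ 0 ∧ n < 0)
instance (b : Int) (n : Int) (d : Int) : Decidable (Pre_es_creixent_decreixent b n d) := by
  unfold Pre_es_creixent_decreixent; infer_instance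

def pvWitness_es_creixent_decreixent : Int × Int × Int := (10, 132, 1)

def Spec_es_creixent_decreixent (b : Int) (n : Int) (d : Int) (out : Bool) : Prop := out = es_creixent_decreixent_alt b n d
instance (b : Int) (n : Int) (d : Int) (out : Bool) : Decidable (Spec_es_creixent_decreixent b n d out) := by unfold Spec_es_creixent_decreixent; infer_instance

-- ===== CLAIM (what is proved, stated in full; the proofs are below) =====
def Claim_equal_es_creixent_decreixent : Prop := ∀ (b : Int) (n : Int) (d : Int), Dom_es_creixent_decreixent b n d → Pre_es_creixent_decreixent b n d → Spec_es_creixent_decreixent b n d (es_creixent_decreixent b n d)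

-- ===== LEMMAS AND PROOFS =====

-- the two loop bodies agree step by step, for every fuel and state
theorem pvGo_eq_loop (fuel : Nat) : ∀ (b d n : Int), pvGoA fuel b n d = pvLoopB fuel b (decide (PySem.Int.mod d 2 ≠ 0)) n := by
  induction fuel with
  | zero => intros; rfl
  | succ f ih =>
    intro b d n
    by_cases hd : PySem.Int.mod d 2 = 0
    · have hinc : (decide (PySem.Int.mod d 2 ≠ 0)) = false := by
        simp only [hd, ne_eq, not_true, decide_false]
      rw [hinc]
      simp only [pvGoA, pvLoopB, hd, if_true, Bool.false_eq_true, false_and, if_false,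
        not_false_iff, true_and]
      by_cases h1 : n < b * b * b
      · simp only [h1, if_true]
        by_cases h2 : PySem.Int.mod n b ≤ PySem.Int.mod (PySem.Int.floordiv n (b * b)) b
        · simp [h2]
        · simp [h2]; omega
      · simp only [h1, if_false]
        by_cases h2 : PySem.Int.mod n b ≤ PySem.Int.mod (PySem.Int.floordiv n (b * b)) b
        · simp [h2]
        · by_cases h3 : PySem.Int.mod (PySem.Int.floordiv n b) b ≥ PySem.Int.mod (PySem.Int.floordiv n (b * b * b)) b
          · simp [h2, h3]
          · have hrec := ih b d (PySem.Int.floordiv n (b * b))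
            rw [hinc] at hrec
            simp [h2, h3, hrec]
    · have hinc : (decide (PySem.Int.mod d 2 ≠ 0)) = true := by
        simp only [hd, ne_eq, not_false_iff, decide_true]
      rw [hinc]
      simp only [pvGoA, pvLoopB, hd, if_false, true_and, not_true,
        false_and, if_false]
      by_cases h1 : n < b * b
      · simp [h1]
      · simp only [h1, if_false]
        by_cases h2 : PySem.Int.mod n b ≥ PySem.Int.mod (PySem.Int.floordiv n (b * b)) b
        · simp [h2]
        · by_cases h3 : PySem.Int.mod (PySem.Int.floordiv n b) b ≤ PySem.Int.mod (PySem.Int.floordiv n (b * b * b)) b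
          · simp [h2, h3]
          · have hrec := ih b d (PySem.Int.floordiv n (b * b))
            rw [hinc] at hrec
            simp [h2, h3, hrec]

theorem es_creixent_decreixent_spec : Claim_equal_es_creixent_decreixent := by
  intro b n d _ _
  unfold Spec_es_creixent_decreixent es_creixent_decreixent es_creixent_decreixent_alt
  exact pvGo_eq_loop _ b d n
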